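-- pv_equiv track=rewrite | github.com/HenryMBaldwin/UnblockMeUnblocked | unblock.py | smooth_moves
-- ===== SOURCE A (Python) =====
-- def smooth_moves(m):
-- 	i = 0
-- 	while i < len(m):
-- 		if i != 0:
-- 			if m[i][1:4] == m[i-1][10:13]:
-- 				new_move = m[i-1][0:10] + m[i][10:14]
-- 				m.pop(i)
-- 				i = i-1
-- 				m[i] = new_move
-- 		i += 1
-- 	return m
-- ===== SOURCE B (Python) =====
-- def smooth_moves(m):
-- 	out = []
-- 	for s in m:
-- 		if out and s[1:4] == out[-1][10:13]:
-- 			out[-1] = out[-1][0:10] + s[10:14]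
-- 		else:
-- 			out.append(s)
-- 	m[:] = out
-- 	return m
-- ===== Notes on version B (the rewrite author's own statement) =====
-- stated objective: faster
-- what changed: Replaces A's index-juggling while loop that pops the merged element out of the middle of the list and backtracks the index with a single forward pass appending to (or updating the tail of) an output accumulator, then writes it back with m[:] = out.
import Mathlib
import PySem

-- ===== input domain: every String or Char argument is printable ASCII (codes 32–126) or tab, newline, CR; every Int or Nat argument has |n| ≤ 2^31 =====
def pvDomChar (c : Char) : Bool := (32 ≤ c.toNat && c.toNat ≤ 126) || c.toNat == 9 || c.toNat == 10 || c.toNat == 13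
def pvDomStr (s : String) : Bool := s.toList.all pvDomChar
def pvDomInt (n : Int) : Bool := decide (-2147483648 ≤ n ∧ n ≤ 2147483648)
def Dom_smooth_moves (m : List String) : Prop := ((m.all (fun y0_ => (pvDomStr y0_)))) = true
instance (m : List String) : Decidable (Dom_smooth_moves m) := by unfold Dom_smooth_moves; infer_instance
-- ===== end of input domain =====

-- B replaces A's index loop with pop/backtrack (O(n^2) list shifting) by a single forward
-- pass with an output accumulator; both Pythons mutate the argument list in place and
-- return the same list object, so the proved equivalence (return value) covers the mutation too.

-- Python '+' on strings, exact (String.append is opaque to the kernel, so concatenate code points)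
def pyCat (s t : String) : String := String.ofList (s.toList ++ t.toList)

-- ===== PORT A =====
-- the while loop: state is (current list m, index i); pop+backtrack keeps i, else i+1
def smoothLoopA (m : List String) (i : Nat) : List String :=
  if _h : i < m.length then
    if i ≠ 0 ∧ PySem.Str.slice (m.getD i "") (some 1) (some 4)
             = PySem.Str.slice (m.getD (i-1) "") (some 10) (some 13) then
      let new_move := pyCat (PySem.Str.slice (m.getD (i-1) "") (some 0) (some 10))
                            (PySem.Str.slice (m.getD i "") (some 10) (some 14))
      -- m.pop(i); i = i-1; m[i] = new_move; i += 1  (net: list shrinks, index unchanged)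
      smoothLoopA ((m.eraseIdx i).set (i-1) new_move) i
    else
      smoothLoopA m (i+1)
  else m
termination_by m.length - i
decreasing_by
  · simp only [List.length_set, List.length_eraseIdx_of_lt _h]; omega
  · omega

def smooth_moves (m : List String) : List String := smoothLoopA m 0

-- ===== PORT B =====
-- one step of B's for-loop; 'out' is kept reversed (head = out[-1]) so that
-- out[-1] update / append are head operations; reversed at the end
def smoothStepB (out : List String) (s : String) : List String :=
  match out with
  | a :: rest =>
      if PySem.Str.slice s (some 1) (some 4) = PySem.Str.slice a (some 10) (some 13) then
        pyCat (PySem.Str.slice a (some 0) (some 10)) (PySem.Str.slice s (some 10) (some 14)) :: rest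
      else s :: a :: rest
  | [] => [s]

def smooth_moves_alt (m : List String) : List String :=
  (m.foldl smoothStepB []).reverse

-- ===== PRECONDITION & SPEC =====
def Spec_smooth_moves (m : List String) (out : List String) : Prop := out = smooth_moves_alt m
instance (m : List String) (out : List String) : Decidable (Spec_smooth_moves m out) := by unfold Spec_smooth_moves; infer_instance

-- ===== CLAIM (what is proved, stated in full; the proofs are below) =====
def Claim_equal_smooth_moves : Prop := ∀ (m : List String), Dom_smooth_moves m → Spec_smooth_moves m (smooth_moves m)

-- ===== LEMMAS AND PROOFS =====

-- loop invariant: A's state (m, i) with the processed prefix of m being acc reversed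
-- computes exactly B's fold continued from accumulator acc over the unprocessed tail
lemma loopA_eq_foldB : ∀ (rest acc : List String),
    smoothLoopA (acc.reverse ++ rest) acc.length = (List.foldl smoothStepB acc rest).reverse := by
  intro rest
  induction rest with
  | nil =>
      intro acc
      rw [smoothLoopA]
      simp
  | cons s r ih =>
      intro acc
      rw [smoothLoopA]
      have hlen : acc.length < (acc.reverse ++ s :: r).length := by simp
      rw [dif_pos hlen]
      have hget : (acc.reverse ++ s :: r).getD acc.length "" = s := by
        simp [List.getD]
      match acc with
      | [] =>
          simp only [List.length_nil, List.reverse_nil, List.nil_append] at hget ⊢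
          rw [if_neg (by simp)]
          have := ih [s]
          simpa using this
      | a :: t =>
          have hshape : (a :: t).reverse ++ s :: r = t.reverse ++ a :: s :: r := by simp
          have hget1 : ((a :: t).reverse ++ s :: r).getD ((a :: t).length - 1) "" = a := by
            rw [hshape]
            have hl : (a :: t).length - 1 = t.reverse.length := by simp
            rw [hl]
            simp [List.getD]
          rw [hget, hget1]
          by_cases hc : PySem.Str.slice s (some 1) (some 4)
              = PySem.Str.slice a (some 10) (some 13)
          · rw [if_pos ⟨by simp, hc⟩]
            have herase : ((a :: t).reverse ++ s :: r).eraseIdx (a :: t).length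
                = (a :: t).reverse ++ r := by
              have hl : (a :: t).length = ((a :: t).reverse).length := by simp
              rw [hl, List.eraseIdx_append_of_length_le (le_refl _)]
              simp
            have hset : (((a :: t).reverse ++ s :: r).eraseIdx (a :: t).length).set
                ((a :: t).length - 1)
                (pyCat (PySem.Str.slice a (some 0) (some 10)) (PySem.Str.slice s (some 10) (some 14)))
                = ((pyCat (PySem.Str.slice a (some 0) (some 10)) (PySem.Str.slice s (some 10) (some 14))) :: t).reverse ++ r := by
              rw [herase]
              have h1 : (a :: t).reverse ++ r = t.reverse ++ a :: r := by simp
              have h2 : (a :: t).length - 1 = t.reverse.length := by simp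
              rw [h1, h2, List.set_append_right _ _ (le_refl _)]
              simp
            show smoothLoopA ((((a :: t).reverse ++ s :: r).eraseIdx (a :: t).length).set
                ((a :: t).length - 1)
                (pyCat (PySem.Str.slice a (some 0) (some 10)) (PySem.Str.slice s (some 10) (some 14))))
                (a :: t).length = (List.foldl smoothStepB (a :: t) (s :: r)).reverse
            rw [hset]
            have hl : (a :: t).length
                = ((pyCat (PySem.Str.slice a (some 0) (some 10)) (PySem.Str.slice s (some 10) (some 14))) :: t).length := by simp
            rw [hl, ih]
            simp [smoothStepB, hc]
          · rw [if_neg (by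
              intro hx
              exact hc hx.2)]
            have h1 : (a :: t).reverse ++ s :: r = (s :: a :: t).reverse ++ r := by simp
            have h2 : (a :: t).length + 1 = (s :: a :: t).length := by simp
            rw [h1, h2, ih (s :: a :: t)]
            simp [smoothStepB, hc]

-- ===== VERDICT (by name: the statement is the Claim_ definition above) =====
theorem smooth_moves_spec : Claim_equal_smooth_moves := by
  intro m _
  show smooth_moves m = smooth_moves_alt m
  have := loopA_eq_foldB m []
  simpa [smooth_moves, smooth_moves_alt] using this
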